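-- pv_equiv track=rewrite | github.com/dennisjlee/adventofcode | aoc2023/day13.py | find_vertical_reflection
-- ===== SOURCE A (Python) =====
-- def find_vertical_reflection(grid: list[list[str]], error_goal=0) -> int | None:
--     height = len(grid)
--     width = len(grid[0])
--     for x in range(width - 1):
--         errors = 0
--         for dx in range(min(x + 1, width - x - 1)):
--             errors += sum(1 for y in range(height) if grid[y][x - dx] != grid[y][x + dx + 1])
--             if errors > error_goal:
--                 break
--
--         if errors == error_goal:
--             return x
--
--     return None
-- ===== SOURCE B (Python) =====
-- def find_vertical_reflection(grid: list[list[str]], error_goal=0):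
--     width = len(grid[0])
--     # transpose once: each column as a list, then compare whole columns pairwise
--     cols = [[row[x] for row in grid] for x in range(width)]
--     for x in range(width - 1):
--         total = sum(sum(a != b for a, b in zip(c1, c2))
--                     for c1, c2 in zip(cols[x::-1], cols[x + 1:]))
--         if total == error_goal:
--             return x
--     return None
-- ===== Notes on version B (the rewrite author's own statement) =====
-- stated objective: alternative
-- what changed: B transposes the grid into explicit column lists once, then for each candidate mirror position sums whole-column Hamming distances over zip(cols[x::-1], cols[x+1:]) in one comprehension, replacing A's triple-nested per-cell index loop with its stateful early-break accumulator.
-- outside the precondition, e.g. on find_vertical_reflection([['a', 'a', 'b'], ['a', 'a']], 0): A returns 0, B raises IndexError; on find_vertical_reflection([['a'], []], 0): A returns None, B raises IndexError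
import Mathlib
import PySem

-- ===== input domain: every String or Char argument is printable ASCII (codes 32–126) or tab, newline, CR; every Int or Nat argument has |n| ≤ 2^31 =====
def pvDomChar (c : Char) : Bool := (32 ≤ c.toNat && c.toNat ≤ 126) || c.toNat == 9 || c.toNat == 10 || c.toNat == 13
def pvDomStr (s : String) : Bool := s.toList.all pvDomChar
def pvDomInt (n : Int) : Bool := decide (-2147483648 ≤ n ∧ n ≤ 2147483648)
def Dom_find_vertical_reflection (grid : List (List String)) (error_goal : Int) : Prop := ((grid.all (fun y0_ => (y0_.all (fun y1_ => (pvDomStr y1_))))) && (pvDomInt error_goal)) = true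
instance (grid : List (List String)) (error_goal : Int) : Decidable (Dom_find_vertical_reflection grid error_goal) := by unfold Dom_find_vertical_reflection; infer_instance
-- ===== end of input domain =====

-- B re-implements the search by transposing the grid into column lists once and summing
-- whole-column Hamming distances over zipped mirror pairs (objective: alternative decomposition).

-- ===== PORT A =====
-- errors contributed by comparing columns i and j cell by cell over all rows
-- (grid[y][..] accesses are in range under Pre_; pyGetD/pyGet? are exact there)
def pvColErrors (grid : List (List String)) (i j : Int) : Int :=
  ((PySem.List.pyRange 0 (grid.length : Int) 1).countP (fun y =>
    decide (PySem.List.pyGet? (PySem.List.pyGetD grid y ([] : List String)) i ≠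
            PySem.List.pyGet? (PySem.List.pyGetD grid y ([] : List String)) j)) : Int)

-- inner 'for dx in range(...)' with the 'break' on errors > error_goal
def pvInnerA (grid : List (List String)) (x goal : Int) : List Int → Int → Int
  | [], errors => errors
  | dx :: rest, errors =>
    let errors' := errors + pvColErrors grid (x - dx) (x + dx + 1)
    if errors' > goal then errors' else pvInnerA grid x goal rest errors'

-- outer 'for x in range(width - 1)'
def pvOuterA (grid : List (List String)) (width goal : Int) : List Int → Option Int
  | [] => none
  | x :: rest =>
    let errors := pvInnerA grid x goal
      (PySem.List.pyRange 0 (min (x + 1) (width - x - 1)) 1) 0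
    if errors = goal then some x else pvOuterA grid width goal rest

def find_vertical_reflection (grid : List (List String)) (error_goal : Int) : Option Int :=
  let width : Int := ((PySem.List.pyGetD grid 0 ([] : List String)).length : Int)
  pvOuterA grid width error_goal (PySem.List.pyRange 0 (width - 1) 1)

-- ===== PORT B =====
-- sum(a != b for a, b in zip(c1, c2))
def pvColDiff (c1 c2 : List String) : Nat :=
  (c1.zip c2).countP (fun p => decide (p.1 ≠ p.2))

-- cols = [[row[x] for row in grid] for x in range(width)]  (row[x] in range under Pre_)
def pvColsB (grid : List (List String)) (width : Nat) : List (List String) :=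
  (List.range width).map (fun x => grid.map (fun row => row.getD x ""))

-- for x in range(width - 1): total = sum(... zip(cols[x::-1], cols[x+1:]));
-- cols[x::-1] = (cols.take (x+1)).reverse, cols[x+1:] = cols.drop (x+1) (nonneg bounds)
def pvOuterB (cols : List (List String)) (goal : Int) : List Nat → Option Int
  | [] => none
  | x :: rest =>
    let total : Int := ((((cols.take (x + 1)).reverse).zip (cols.drop (x + 1))).map
      (fun p => (pvColDiff p.1 p.2 : Int))).sum
    if total = goal then some (x : Int) else pvOuterB cols goal rest

def find_vertical_reflection_alt (grid : List (List String)) (error_goal : Int) : Option Int :=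
  let width := (grid.headD []).length
  pvOuterB (pvColsB grid width) error_goal (List.range (width - 1))

-- ===== PRECONDITION & SPEC =====
-- Pre_ excludes the empty grid (A raises IndexError on grid[0]) and, whenever the first row is
-- nonempty, grids with a row shorter than the first row: on those A's per-cell indexing raises
-- IndexError except when it luckily returns before reaching the short cell, while B's eager
-- column transposition itself raises IndexError there.
def Pre_find_vertical_reflection (grid : List (List String)) (error_goal : Int) : Prop :=
  grid ≠ [] ∧ ((grid.headD []).length ≠ 0 → ∀ row ∈ grid, (grid.headD []).length ≤ row.length)
instance (grid : List (List String)) (error_goal : Int) : Decidable (Pre_find_vertical_reflection grid error_goal) := by unfold Pre_find_vertical_reflection; infer_instance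

def pvWitness_find_vertical_reflection : List (List String) × Int :=
  ([["#", ".", "."], ["#", ".", "."]], 0)

def Spec_find_vertical_reflection (grid : List (List String)) (error_goal : Int) (out : Option Int) : Prop := out = find_vertical_reflection_alt grid error_goal
instance (grid : List (List String)) (error_goal : Int) (out : Option Int) : Decidable (Spec_find_vertical_reflection grid error_goal out) := by unfold Spec_find_vertical_reflection; infer_instance

-- ===== CLAIM (what is proved, stated in full; the proofs are below) =====
def Claim_equal_find_vertical_reflection : Prop := ∀ (grid : List (List String)) (error_goal : Int), Dom_find_vertical_reflection grid error_goal → Pre_find_vertical_reflection grid error_goal → Spec_find_vertical_reflection grid error_goal (find_vertical_reflection grid error_goal)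

-- ===== LEMMAS AND PROOFS =====

theorem pvColErrors_nonneg (grid : List (List String)) (i j : Int) :
    0 ≤ pvColErrors grid i j := Int.natCast_nonneg _

theorem pv_sum_nonneg (l : List Int) (h : ∀ a ∈ l, 0 ≤ a) : 0 ≤ l.sum := by
  induction l with
  | nil => simp
  | cons a t ih =>
    simp only [List.sum_cons]
    have := h a (by simp)
    have := ih (fun b hb => h b (by simp [hb]))
    omega

-- A's inner break-loop hits error_goal exactly when the full mismatch sum does
theorem pvInnerA_eq_goal_iff (grid : List (List String)) (x goal : Int) :
    ∀ (dxs : List Int) (acc : Int),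
      (pvInnerA grid x goal dxs acc = goal) ↔
      (acc + (dxs.map (fun dx => pvColErrors grid (x - dx) (x + dx + 1))).sum = goal) := by
  intro dxs
  induction dxs with
  | nil => intro acc; simp [pvInnerA]
  | cons dx rest ih =>
    intro acc
    simp only [pvInnerA, List.map_cons, List.sum_cons]
    by_cases h : acc + pvColErrors grid (x - dx) (x + dx + 1) > goal
    · simp only [if_pos h]
      have hs : 0 ≤ (rest.map (fun dx => pvColErrors grid (x - dx) (x + dx + 1))).sum := by
        apply pv_sum_nonneg
        intro a ha
        obtain ⟨dx', _, rfl⟩ := List.mem_map.mp ha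
        exact pvColErrors_nonneg _ _ _
      omega
    · simp only [if_neg h]
      rw [ih]
      omega

theorem pv_countP_range_getD {α : Type} (q : α → Bool) (d : α) :
    ∀ l : List α, (List.range l.length).countP (fun y => q (l.getD y d)) = l.countP q := by
  intro l
  induction l with
  | nil => simp
  | cons a t ih =>
    rw [List.length_cons, List.range_succ_eq_map, List.countP_cons, List.countP_map]
    simp only [List.getD_cons_zero, List.getD_cons_succ, Function.comp_def]
    rw [List.countP_cons, ih]

-- per-cell column comparison (A) = Hamming distance of the transposed columns (B)
theorem pvColErrors_eq (grid : List (List String)) (w : Nat)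
    (hlen : ∀ row ∈ grid, w ≤ row.length) (i j : Nat) (hi : i < w) (hj : j < w) :
    pvColErrors grid (i : Int) (j : Int) =
      (pvColDiff (grid.map (fun row => row.getD i ""))
                 (grid.map (fun row => row.getD j "")) : Nat) := by
  unfold pvColErrors pvColDiff
  congr 1
  rw [List.zip_map', List.countP_map, PySem.List.pyRange_zero_natCast, List.countP_map]
  rw [← pv_countP_range_getD ((fun p : String × String => decide (p.1 ≠ p.2)) ∘ (fun a : List String => (a.getD i "", a.getD j ""))) ([] : List String) grid]
  apply List.countP_congr
  intro y hy
  have hy' : y < grid.length := List.mem_range.mp hy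
  simp only [Function.comp_def, PySem.List.pyGetD_natCast]
  set row := grid.getD y ([] : List String) with hrow
  have hrmem : row ∈ grid := by
    rw [hrow, List.getD_eq_getElem _ _ hy']
    exact List.getElem_mem _
  have hrl : w ≤ row.length := hlen row hrmem
  have h1 : PySem.List.pyGet? row (i : Int) = some (row.getD i "") := by
    rw [PySem.List.pyGet?_natCast, List.getElem?_eq_getElem (by omega), List.getD_eq_getElem _ _ (by omega)]
  have h2 : PySem.List.pyGet? row (j : Int) = some (row.getD j "") := by
    rw [PySem.List.pyGet?_natCast, List.getElem?_eq_getElem (by omega), List.getD_eq_getElem _ _ (by omega)]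
  rw [h1, h2]
  simp

-- B's zipped mirror pairs, as an explicit range over dx
theorem pvZip_eq (grid : List (List String)) (w : Nat) (x : Nat) (hx : x + 1 < w) :
    ((((pvColsB grid w).take (x + 1)).reverse).zip ((pvColsB grid w).drop (x + 1))) =
      (List.range (min (x + 1) (w - 1 - x))).map
        (fun dx => (grid.map (fun row => row.getD (x - dx) ""),
                    grid.map (fun row => row.getD (x + dx + 1) ""))) := by
  have hcl : (pvColsB grid w).length = w := by simp [pvColsB]
  apply List.ext_getElem
  · simp only [List.length_zip, List.length_reverse, List.length_take, List.length_drop,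
      List.length_map, List.length_range, hcl]
    omega
  · intro k h1 h2
    have hk : k < min (x + 1) (w - 1 - x) := by
      simp only [List.length_zip, List.length_reverse, List.length_take, List.length_drop,
        hcl] at h1
      omega
    have hk1 : k < x + 1 := lt_of_lt_of_le hk (min_le_left _ _)
    have hk2 : k < w - 1 - x := lt_of_lt_of_le hk (min_le_right _ _)
    have hkx : k ≤ x := by omega
    have hkw : x + k + 1 < w := by omega
    have colAt : ∀ (i : Nat) (h : i < (pvColsB grid w).length),
        (pvColsB grid w)[i]'h = grid.map (fun row => row.getD i "") := by
      intro i h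
      simp only [pvColsB, List.getElem_map, List.getElem_range]
    rw [List.getElem_zip, List.getElem_reverse, List.getElem_take, List.getElem_drop,
        List.getElem_map, List.getElem_range, colAt, colAt]
    have hidx1 : ((pvColsB grid w).take (x + 1)).length - 1 - k = x - k := by
      simp only [List.length_take, hcl]
      omega
    have hidx2 : x + 1 + k = x + k + 1 := by omega
    rw [hidx1, hidx2]

-- the per-candidate totals agree
theorem pvTotal_eq (grid : List (List String)) (w : Nat)
    (hlen : ∀ row ∈ grid, w ≤ row.length) (x : Nat) (hx : x + 1 < w) :
    ((PySem.List.pyRange 0 (min ((x : Int) + 1) ((w : Int) - x - 1)) 1).map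
        (fun dx => pvColErrors grid ((x : Int) - dx) ((x : Int) + dx + 1))).sum =
      (((((pvColsB grid w).take (x + 1)).reverse).zip ((pvColsB grid w).drop (x + 1))).map
        (fun p => (pvColDiff p.1 p.2 : Int))).sum := by
  have hm : min ((x : Int) + 1) ((w : Int) - x - 1) = ((min (x + 1) (w - 1 - x) : Nat) : Int) := by
    omega
  rw [hm, PySem.List.pyRange_zero_natCast, pvZip_eq grid w x hx, List.map_map, List.map_map]
  congr 1
  apply List.map_congr_left
  intro dx hdx
  have hdx' : dx < min (x + 1) (w - 1 - x) := List.mem_range.mp hdx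
  simp only [Function.comp_def]
  have c1 : (x : Int) - (dx : Int) = ((x - dx : Nat) : Int) := by omega
  have c2 : (x : Int) + (dx : Int) + 1 = ((x + dx + 1 : Nat) : Int) := by push_cast; ring
  rw [c1, c2, pvColErrors_eq grid w hlen (x - dx) (x + dx + 1) (by omega) (by omega)]

-- the two outer searches agree step by step
theorem pvOuter_eq (grid : List (List String)) (goal : Int) (w : Nat)
    (hlen : ∀ row ∈ grid, w ≤ row.length) :
    ∀ xs : List Nat, (∀ x ∈ xs, x + 1 < w) →
      pvOuterA grid (w : Int) goal (xs.map (fun n : Nat => (n : Int))) =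
        pvOuterB (pvColsB grid w) goal xs := by
  intro xs
  induction xs with
  | nil => intro _; rfl
  | cons x rest ih =>
    intro hb
    have hx : x + 1 < w := hb x (by simp)
    rw [List.map_cons]
    show (if pvInnerA grid (x : Int) goal
        (PySem.List.pyRange 0 (min ((x : Int) + 1) ((w : Int) - x - 1)) 1) 0 = goal then
          some (x : Int)
        else pvOuterA grid (w : Int) goal (rest.map (fun n : Nat => (n : Int)))) =
      (if ((((((pvColsB grid w).take (x + 1)).reverse).zip ((pvColsB grid w).drop (x + 1))).map
          (fun p => (pvColDiff p.1 p.2 : Int))).sum) = goal then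
          some (x : Int)
        else pvOuterB (pvColsB grid w) goal rest)
    have hiff := pvInnerA_eq_goal_iff grid (x : Int) goal
      (PySem.List.pyRange 0 (min ((x : Int) + 1) ((w : Int) - x - 1)) 1) 0
    rw [pvTotal_eq grid w hlen x hx] at hiff
    simp only [zero_add] at hiff
    by_cases h : ((((((pvColsB grid w).take (x + 1)).reverse).zip ((pvColsB grid w).drop (x + 1))).map
        (fun p => (pvColDiff p.1 p.2 : Int))).sum) = goal
    · rw [if_pos (hiff.mpr h), if_pos h]
    · rw [if_neg (fun hc => h (hiff.mp hc)), if_neg h]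
      exact ih (fun y hy => hb y (by simp [hy]))

-- ===== VERDICT (by name: the statement is the Claim_ definition above) =====
theorem find_vertical_reflection_spec : Claim_equal_find_vertical_reflection := by
  unfold Claim_equal_find_vertical_reflection
  intro grid goal _ hPre
  obtain ⟨hne, hlen⟩ := hPre
  obtain ⟨r, t, rfl⟩ : ∃ r t, grid = r :: t := by
    cases grid with
    | nil => exact absurd rfl hne
    | cons r t => exact ⟨r, t, rfl⟩
  unfold Spec_find_vertical_reflection
  have hhead : (r :: t).headD ([] : List String) = r := rfl
  rw [hhead] at hlen
  show pvOuterA (r :: t) ((PySem.List.pyGetD (r :: t) 0 ([] : List String)).length : Int) goal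
      (PySem.List.pyRange 0 (((PySem.List.pyGetD (r :: t) 0 ([] : List String)).length : Int) - 1) 1) =
    pvOuterB (pvColsB (r :: t) (((r :: t).headD ([] : List String)).length)) goal
      (List.range ((((r :: t).headD ([] : List String)).length) - 1))
  have hg : PySem.List.pyGetD (r :: t) 0 ([] : List String) = r := by
    simp [PySem.List.pyGetD_zero]
  rw [hg, hhead]
  cases hw : r.length with
  | zero =>
    have h1 : PySem.List.pyRange 0 (((0 : Nat) : Int) - 1) 1 = [] := by decide
    rw [h1]
    rfl
  | succ k =>
    have h1 : (((k + 1 : Nat) : Int) - 1) = ((k : Nat) : Int) := by push_cast; ring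
    rw [h1, PySem.List.pyRange_zero_natCast]
    have hrange : k + 1 - 1 = k := rfl
    rw [hrange]
    rw [hw] at hlen
    exact pvOuter_eq (r :: t) goal (k + 1) (hlen (by omega)) (List.range k)
      (fun y hy => by have := List.mem_range.mp hy; omega)
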